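-- pv_equiv track=rewrite | github.com/ooeunz/programmers | Lv2/stepping_stone1.py | solution
-- ===== SOURCE A (Python) =====
-- def solution(stones: list, k: int):
--     last_min = sum(stones[0:k])
--
--     compare = sum(stones[0:k])
--     record = 0
--
--     for i in range(1, len(stones) - k):
--         compare -= stones[i - 1]
--         compare += stones[i + k - 1]
--
--         if last_min > compare:
--             last_min = compare
--             record = i
--
--     return max(stones[record : record + k])
-- ===== SOURCE B (Python) =====
-- def solution(stones: list, k: int):
--     n = len(stones)
--     prefix = [0]
--     for x in stones:
--         prefix.append(prefix[-1] + x)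
--     sums = [prefix[i + k] - prefix[i] for i in range(n - k)]
--     if sums:
--         record = sums.index(min(sums))
--     else:
--         record = 0
--     return max(stones[record:record + k])
-- ===== Notes on version B (the rewrite author's own statement) =====
-- stated objective: alternative
-- what changed: Replaces the single combined sliding-window loop (incremental sum update with in-loop min/argmin tracking) by a three-stage decomposition: build a prefix-sum table, derive all window sums from it, then take index(min(sums)) as a separate argmin pass.
-- outside the precondition, e.g. on solution([0, 1], -1): A returns 0, B raises ValueError
import Mathlib
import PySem

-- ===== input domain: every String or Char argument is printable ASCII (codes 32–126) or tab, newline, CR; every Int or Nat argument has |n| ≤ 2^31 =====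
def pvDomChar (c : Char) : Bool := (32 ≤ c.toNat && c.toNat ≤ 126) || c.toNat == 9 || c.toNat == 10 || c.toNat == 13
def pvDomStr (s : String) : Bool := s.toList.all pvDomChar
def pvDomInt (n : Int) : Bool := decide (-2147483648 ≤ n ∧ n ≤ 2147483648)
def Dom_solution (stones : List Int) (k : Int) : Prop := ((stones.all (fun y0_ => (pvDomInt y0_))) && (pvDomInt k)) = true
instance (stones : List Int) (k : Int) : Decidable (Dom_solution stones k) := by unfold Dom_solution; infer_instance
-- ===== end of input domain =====

-- B replaces A's combined sliding-window loop by a prefix-sum table, a list of all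
-- window sums, and a separate index(min(sums)) argmin pass (objective: alternative).

-- ===== PORT A =====
-- the loop body: compare -= stones[i-1]; compare += stones[i+k-1]; if last_min > compare: …
def aStep (stones : List Int) (k : Int) (s : Int × Int × Int) (i : Int) : Int × Int × Int :=
  let compare := s.1 - PySem.List.pyGetD stones (i - 1) 0 + PySem.List.pyGetD stones (i + k - 1) 0
  if s.2.1 > compare then (compare, compare, i) else (compare, s.2.1, s.2.2)

def solution (stones : List Int) (k : Int) : Int :=
  let last_min := (PySem.List.slice stones (some 0) (some k)).sum
  let compare := (PySem.List.slice stones (some 0) (some k)).sum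
  let record : Int := 0
  let st := (PySem.List.pyRange 1 ((stones.length : Int) - k) 1).foldl
              (aStep stones k) (compare, last_min, record)
  (PySem.List.max? (PySem.List.slice stones (some st.2.2) (some (st.2.2 + k))) (fun x => x)).getD 0

-- ===== PORT B =====
-- prefix = [0]; for x in stones: prefix.append(prefix[-1] + x)
def bPrefix (stones : List Int) : List Int :=
  stones.foldl (fun p x => p ++ [PySem.List.pyGetD p (-1) 0 + x]) [(0 : Int)]

-- sums = [prefix[i+k] - prefix[i] for i in range(n - k)]
def bSums (stones : List Int) (k : Int) : List Int :=
  (PySem.List.pyRange 0 ((stones.length : Int) - k) 1).map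
    (fun i => PySem.List.pyGetD (bPrefix stones) (i + k) 0 - PySem.List.pyGetD (bPrefix stones) i 0)

def solution_alt (stones : List Int) (k : Int) : Int :=
  let sums := bSums stones k
  let record : Int :=
    if sums ≠ [] then
      ((PySem.List.index? sums ((PySem.List.min? sums (fun y => y)).getD 0)).getD 0 : Nat)
    else 0
  (PySem.List.max? (PySem.List.slice stones (some record) (some (record + k))) (fun x => x)).getD 0

-- ===== PRECONDITION & SPEC =====
-- Pre_ excludes stones = [] and k ≤ 0: there the final max(stones[record:record+k])
-- is usually a max of an empty slice (ValueError) in both programs, and where A still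
-- happens to return (negative k hitting Python's negative-slice wraparound) B raises.
def Pre_solution (stones : List Int) (k : Int) : Prop := stones ≠ [] ∧ 1 ≤ k
instance (stones : List Int) (k : Int) : Decidable (Pre_solution stones k) := by
  unfold Pre_solution; infer_instance

def pvWitness_solution : List Int × Int := ([1, 2, 3, 5, 2], 2)

def Spec_solution (stones : List Int) (k : Int) (out : Int) : Prop := out = solution_alt stones k
instance (stones : List Int) (k : Int) (out : Int) : Decidable (Spec_solution stones k out) := by
  unfold Spec_solution; infer_instance

-- ===== CLAIM (what is proved, stated in full; the proofs are below) =====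
def Claim_equal_solution : Prop := ∀ (stones : List Int) (k : Int), Dom_solution stones k → Pre_solution stones k → Spec_solution stones k (solution stones k)

-- ===== LEMMAS AND PROOFS =====

-- running suffix of the prefix-sum list: partials c xs = [c+x1, c+x1+x2, …]
def partials : Int → List Int → List Int
  | _, [] => []
  | c, x :: xs => (c + x) :: partials (c + x) xs

-- reference recursion for A's loop state (compare, last_min, record)
def Aiter (w : Nat → Int) : Nat → Int × Int × Nat
  | 0 => (w 0, w 0, 0)
  | j + 1 =>
    let s := Aiter w j
    let c := w (j + 1)
    if s.2.1 > c then (c, c, j + 1) else (c, s.2.1, s.2.2)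

theorem bPrefix_build (xs : List Int) : ∀ (a : List Int) (c : Int),
    xs.foldl (fun p x => p ++ [PySem.List.pyGetD p (-1) 0 + x]) (a ++ [c])
      = (a ++ [c]) ++ partials c xs := by
  induction xs with
  | nil => intro a c; simp [partials]
  | cons x xs ih =>
    intro a c
    simp only [List.foldl_cons, PySem.List.pyGetD_neg_one_append_singleton, partials]
    have := ih (a ++ [c]) (c + x)
    simp only [List.append_assoc] at this ⊢
    simpa using this

theorem partials_getD (xs : List Int) : ∀ (c : Int) (i : Nat), i ≤ xs.length →
    (c :: partials c xs).getD i 0 = c + (xs.take i).sum := by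
  induction xs with
  | nil =>
    intro c i h
    simp only [List.length_nil, Nat.le_zero] at h
    subst h; simp
  | cons x xs ih =>
    intro c i h
    cases i with
    | zero => simp
    | succ i =>
      simp only [partials, List.getD_cons_succ]
      have := ih (c + x) i (by simpa using h)
      simp only [this, List.take_succ_cons, List.sum_cons]
      ring

theorem bPrefix_getD (stones : List Int) (i : Nat) (h : i ≤ stones.length) :
    (bPrefix stones).getD i 0 = (stones.take i).sum := by
  have hb : bPrefix stones = ([] : List Int) ++ [(0 : Int)] ++ partials 0 stones := by
    unfold bPrefix
    have := bPrefix_build stones ([] : List Int) 0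
    simpa using this
  rw [hb]
  simpa using partials_getD stones 0 i h

theorem aiter_fst (w : Nat → Int) (j : Nat) : (Aiter w j).1 = w j := by
  cases j with
  | zero => rfl
  | succ j => simp only [Aiter]; split <;> rfl

theorem aiter_min_index (w : Nat → Int) : ∀ j : Nat,
    PySem.List.min? ((List.range (j + 1)).map w) (fun y => y) = some ((Aiter w j).2.1) ∧
    PySem.List.index? ((List.range (j + 1)).map w) ((Aiter w j).2.1) = some ((Aiter w j).2.2) := by
  intro j
  induction j with
  | zero =>
    constructor
    · simp [Aiter, PySem.List.min?_id_cons]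
    · simp [Aiter, List.range_succ]
  | succ j ih =>
    obtain ⟨hmin, hidx⟩ := ih
    have hrange : (List.range (j + 1 + 1)).map w = (List.range (j + 1)).map w ++ [w (j + 1)] := by
      rw [List.range_succ]; simp
    -- min? over the snoc
    obtain ⟨x, t, hxt⟩ : ∃ x t, (List.range (j + 1)).map w = x :: t := by
      cases hl : (List.range (j + 1)).map w with
      | nil => simp [List.range_succ] at hl
      | cons x t => exact ⟨x, t, rfl⟩
    have hmin' : PySem.List.min? ((List.range (j + 1 + 1)).map w) (fun y => y)
        = some (min ((Aiter w j).2.1) (w (j + 1))) := by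
      rw [hrange, hxt]
      rw [hxt, PySem.List.min?_id_cons] at hmin
      have hfold : t.foldl min x = (Aiter w j).2.1 := by injection hmin
      rw [show (x :: t ++ [w (j+1)]) = x :: (t ++ [w (j+1)]) by simp,
          PySem.List.min?_id_cons, List.foldl_append, hfold]
      simp
    have hmem : (Aiter w j).2.1 ∈ (List.range (j + 1)).map w := PySem.List.min?_mem hmin
    have hle : ∀ y ∈ (List.range (j + 1)).map w, (Aiter w j).2.1 ≤ y := by
      intro y hy; exact PySem.List.min?_isMin hmin y hy
    by_cases hlt : (Aiter w j).2.1 > w (j + 1)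
    · have hA : Aiter w (j + 1) = (w (j + 1), w (j + 1), j + 1) := by
        simp only [Aiter]; rw [if_pos hlt]
      refine ⟨?_, ?_⟩
      · rw [hmin', hA]; simp [min_eq_right (le_of_lt hlt)]
      · rw [hrange, hA]
        have hnot : w (j + 1) ∉ (List.range (j + 1)).map w := by
          intro hc; exact absurd (hle _ hc) (by omega)
        dsimp only
        rw [PySem.List.index?_append_singleton_self (h := hnot)]
        simp
    · have hA : Aiter w (j + 1) = (w (j + 1), (Aiter w j).2.1, (Aiter w j).2.2) := by
        simp only [Aiter]; rw [if_neg hlt]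
      refine ⟨?_, ?_⟩
      · rw [hmin', hA]; simp [min_eq_left (by omega : (Aiter w j).2.1 ≤ w (j + 1))]
      · rw [hrange, hA]
        dsimp only
        rw [PySem.List.index?_append_of_mem _ hmem]
        exact hidx

theorem sum_take_succ (xs : List Int) (j : Nat) (h : j < xs.length) :
    (xs.take (j + 1)).sum = (xs.take j).sum + xs.getD j 0 := by
  rw [List.getD_eq_getElem _ _ h]
  exact List.sum_take_succ xs j h

theorem aLoop (stones : List Int) (k : Int) (hk : 1 ≤ k) :
    ∀ j : Nat, j + k.toNat ≤ stones.length →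
      (PySem.List.pyRange 1 ((j : Int) + 1) 1).foldl (aStep stones k)
        ((fun i => (stones.take (i + k.toNat)).sum - (stones.take i).sum) 0,
         (fun i => (stones.take (i + k.toNat)).sum - (stones.take i).sum) 0, (0 : Int))
      = ((Aiter (fun i => (stones.take (i + k.toNat)).sum - (stones.take i).sum) j).1,
         (Aiter (fun i => (stones.take (i + k.toNat)).sum - (stones.take i).sum) j).2.1,
         ((Aiter (fun i => (stones.take (i + k.toNat)).sum - (stones.take i).sum) j).2.2 : Int)) := by
  set w : Nat → Int := fun i => (stones.take (i + k.toNat)).sum - (stones.take i).sum with hw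
  intro j
  induction j with
  | zero =>
    intro _
    rw [PySem.List.pyRange_one_eq_nil (by omega)]
    simp [Aiter]
  | succ j ih =>
    intro hle
    have hsp : PySem.List.pyRange 1 (((j + 1 : Nat) : Int) + 1) 1
        = PySem.List.pyRange 1 ((j : Int) + 1) 1 ++ [(j : Int) + 1] := by
      have := PySem.List.pyRange_one_succ_right (a := 1) (b := (j : Int) + 1) (by omega)
      push_cast
      exact this
    rw [hsp, List.foldl_append, ih (by omega)]
    have hkt1 : 1 ≤ k.toNat := by omega
    have hjlen : j < stones.length := by omega
    have hjk : j + k.toNat < stones.length := by omega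
    -- the shifted window sum
    have hcomp : (Aiter w j).1 - PySem.List.pyGetD stones (((j : Int) + 1) - 1) 0
        + PySem.List.pyGetD stones (((j : Int) + 1) + k - 1) 0 = w (j + 1) := by
      rw [aiter_fst]
      have h1 : ((j : Int) + 1) - 1 = ((j : Nat) : Int) := by omega
      have h2 : ((j : Int) + 1) + k - 1 = (((j + k.toNat : Nat)) : Int) := by
        push_cast [Int.toNat_of_nonneg (by omega : (0:Int) ≤ k)]
        omega
      rw [h1, h2, PySem.List.pyGetD_natCast, PySem.List.pyGetD_natCast]
      have e1 := sum_take_succ stones j hjlen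
      have e2 := sum_take_succ stones (j + k.toNat) hjk
      simp only [hw]
      have harr : j + 1 + k.toNat = j + k.toNat + 1 := by omega
      rw [harr, e1, e2]
      ring
    show aStep stones k ((Aiter w j).1, (Aiter w j).2.1, ((Aiter w j).2.2 : Int)) ((j : Int) + 1) = _
    unfold aStep
    simp only [hcomp]
    by_cases hgt : (Aiter w j).2.1 > w (j + 1)
    · rw [if_pos hgt]
      have : Aiter w (j + 1) = (w (j + 1), w (j + 1), j + 1) := by
        simp only [Aiter]; rw [if_pos hgt]
      rw [this]
      push_cast
      rfl
    · rw [if_neg hgt]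
      have : Aiter w (j + 1) = (w (j + 1), (Aiter w j).2.1, (Aiter w j).2.2) := by
        simp only [Aiter]; rw [if_neg hgt]
      rw [this]

theorem solution_spec : Claim_equal_solution := by
  intro stones k _ hpre
  obtain ⟨hne, hk⟩ := hpre
  have hkt : ((k.toNat : Nat) : Int) = k := Int.toNat_of_nonneg (by omega)
  have hslice0 : (PySem.List.slice stones (some 0) (some k)).sum
      = (stones.take (0 + k.toNat)).sum - (stones.take 0).sum := by
    rw [PySem.List.slice_zero_start, PySem.List.slice_to stones (by omega)]
    simp
  by_cases hm : (stones.length : Int) - k ≤ 0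
  · -- no candidate windows beyond the first: both records are 0
    have hA : PySem.List.pyRange 1 ((stones.length : Int) - k) 1 = [] :=
      PySem.List.pyRange_one_eq_nil (by omega)
    have hB : bSums stones k = [] := by
      unfold bSums
      rw [PySem.List.pyRange_one_eq_nil (by omega)]
      rfl
    unfold Spec_solution solution solution_alt
    simp [hA, hB]
  · set w : Nat → Int := fun i => (stones.take (i + k.toNat)).sum - (stones.take i).sum with hw
    set m : Nat := ((stones.length : Int) - k).toNat with hmdef
    have hm1 : 1 ≤ m := by omega
    have hmL : ((m : Nat) : Int) = (stones.length : Int) - k := by omega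
    have hLm : stones.length = m + k.toNat := by omega
    -- B's window-sum table is the list of true window sums
    have hsums : bSums stones k = (List.range m).map w := by
      unfold bSums
      rw [show ((stones.length : Int) - k) = ((m : Nat) : Int) from hmL.symm]
      rw [PySem.List.pyRange_zero_natCast, List.map_map]
      apply List.map_congr_left
      intro i hi
      have him : i < m := List.mem_range.mp hi
      simp only [Function.comp_apply]
      have h2 : ((i : Nat) : Int) + k = (((i + k.toNat : Nat)) : Int) := by
        push_cast [hkt]; ring
      rw [h2, PySem.List.pyGetD_natCast, PySem.List.pyGetD_natCast]
      rw [bPrefix_getD stones (i + k.toNat) (by omega), bPrefix_getD stones i (by omega)]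
    obtain ⟨hmin, hidx⟩ := aiter_min_index w (m - 1)
    have hm1' : m - 1 + 1 = m := by omega
    rw [hm1'] at hmin hidx
    have hA := aLoop stones k hk (m - 1) (by omega)
    have hrw : ((m - 1 : Nat) : Int) + 1 = (stones.length : Int) - k := by
      omega
    rw [hrw] at hA
    unfold Spec_solution solution solution_alt
    beta_reduce at hA
    rw [← hw] at hA
    simp only [hsums, hslice0, hA]
    have hne2 : (List.map w (List.range m)) ≠ [] := by
      simp only [ne_eq, List.map_eq_nil_iff, List.range_eq_nil]
      omega
    rw [if_pos hne2, hmin]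
    simp only [Option.getD_some]
    rw [hidx]
    simp only [Option.getD_some]
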